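-- pv_equiv track=rewrite | github.com/hemangandhi/derpspace | pythons/ein klien algorithm.py | fst_no_rep
-- ===== SOURCE A (Python) =====
-- def fst_no_rep(s):
--     """
--     Return the index of the first non-repeating element (string or list).
--     Runs in O(n) using a set to store values and tracking the last item that
--     was not a repeat. Returns len(s) if the item is not found.
--     """
--     i = len(s)
--     t = set()
--     r = i
--     while i > 0:
--         i = i - 1
--         if s[i] not in t:
--             r = i
--             t.add(s[i])
--     return r
-- ===== SOURCE B (Python) =====
-- def fst_no_rep(s):
--     last = {}
--     for i, v in enumerate(s):
--         last[v] = i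
--     for i in range(len(s)):
--         if last[s[i]] == i:
--             return i
--     return len(s)
-- ===== Notes on version B (the rewrite author's own statement) =====
-- stated objective: alternative
-- what changed: Replaces A's backward scan with a growing seen-set and running result by a forward-built last-occurrence dict followed by a forward scan returning the first index equal to its value's last occurrence.
import Mathlib
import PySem

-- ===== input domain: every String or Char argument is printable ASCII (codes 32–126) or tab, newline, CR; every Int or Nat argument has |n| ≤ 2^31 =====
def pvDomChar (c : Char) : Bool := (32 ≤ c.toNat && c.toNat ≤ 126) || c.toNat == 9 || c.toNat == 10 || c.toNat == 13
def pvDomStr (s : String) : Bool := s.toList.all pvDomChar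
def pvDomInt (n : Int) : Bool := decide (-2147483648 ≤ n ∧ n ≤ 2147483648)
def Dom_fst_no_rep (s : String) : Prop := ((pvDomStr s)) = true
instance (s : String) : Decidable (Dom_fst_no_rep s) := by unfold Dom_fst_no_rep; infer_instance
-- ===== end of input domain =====

-- B replaces A's backward scan with a last-occurrence dict plus a forward scan (alternative algorithm, same O(n) cost).

-- ===== PORT A =====
-- the while loop: i counts down from len(s); t is the set of seen chars, r the running result
def fstA_go (cs : List Char) : Nat → PySem.Set Char → Int → Int
  | 0, _, r => r
  | i + 1, t, r =>
    let c := cs.getD i ' '       -- s[i]; i is always in range in A's loop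
    if PySem.Set.contains t c then fstA_go cs i t r
    else fstA_go cs i (PySem.Set.add t c) (i : Int)

def fst_no_rep (s : String) : Int :=
  let cs := s.toList
  fstA_go cs cs.length PySem.Set.empty (cs.length : Int)

-- ===== PORT B =====
-- first loop of Source B: last[v] = i for i, v in enumerate(s)
def fstB_last (cs : List Char) : PySem.Dict Char Int :=
  (PySem.List.enumerate cs).foldl (fun d p => d.insert p.2 p.1) PySem.Dict.empty

-- second loop of Source B: for i in range(len(s)): if last[s[i]] == i: return i
def fstB_scan (cs : List Char) (last : PySem.Dict Char Int) : List Int → Int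
  | [] => (cs.length : Int)
  | i :: rest =>
    if last.getD (PySem.List.pyGetD cs i ' ') (-1) = i then i
    else fstB_scan cs last rest

def fst_no_rep_alt (s : String) : Int :=
  let cs := s.toList
  fstB_scan cs (fstB_last cs) (PySem.List.pyRange 0 cs.length 1)

-- ===== PRECONDITION & SPEC =====
def Spec_fst_no_rep (s : String) (out : Int) : Prop := out = fst_no_rep_alt s
instance (s : String) (out : Int) : Decidable (Spec_fst_no_rep s out) := by unfold Spec_fst_no_rep; infer_instance

-- ===== CLAIM (what is proved, stated in full; the proofs are below) =====
def Claim_equal_fst_no_rep : Prop := ∀ (s : String), Dom_fst_no_rep s → Spec_fst_no_rep s (fst_no_rep s)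

-- ===== LEMMAS AND PROOFS =====

-- pure-predicate version of A's loop: at step k the test is "cs[k] occurs again later"
def hFun (cs : List Char) : Nat → Int → Int
  | 0, r => r
  | k + 1, r => hFun cs k (if cs.getD k ' ' ∈ cs.drop (k + 1) then r else (k : Int))

-- the common mathematical answer: first index whose char does not recur later
def firstP (cs : List Char) (n : Nat) : Option Nat :=
  (List.range n).find? (fun j => decide (cs.getD j ' ' ∉ cs.drop (j + 1)))

theorem fstA_go_eq_hFun (cs : List Char) (i : Nat) (t : PySem.Set Char) (r : Int)
    (hi : i ≤ cs.length) (ht : ∀ c, c ∈ t ↔ c ∈ cs.drop i) :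
    fstA_go cs i t r = hFun cs i r := by
  induction i generalizing t r with
  | zero => rfl
  | succ k ih =>
    have hk : k < cs.length := hi
    have hdrop : cs.drop k = cs[k] :: cs.drop (k + 1) := List.drop_eq_getElem_cons hk
    have hget : cs.getD k ' ' = cs[k] := List.getD_eq_getElem cs ' ' hk
    simp only [fstA_go, hFun, hget]
    have hcont : PySem.Set.contains t cs[k] = true ↔ cs[k] ∈ cs.drop (k + 1) := by
      rw [PySem.Set.contains_iff, ht]
    by_cases hmem : cs[k] ∈ cs.drop (k + 1)
    · rw [if_pos (hcont.mpr hmem), if_pos hmem]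
      exact ih t r (Nat.le_of_succ_le hi) (by
        intro c; rw [ht, hdrop]
        simp only [List.mem_cons]
        constructor
        · exact Or.inr
        · rintro (rfl | h)
          · exact hmem
          · exact h)
    · rw [if_neg (fun h => hmem (hcont.mp h)), if_neg hmem]
      exact ih _ _ (Nat.le_of_succ_le hi) (by
        intro c
        rw [PySem.Set.mem_add, ht, hdrop]
        simp only [List.mem_cons]
        tauto)

theorem hFun_eq_firstP (cs : List Char) (n : Nat) (r : Int) :
    hFun cs n r = (firstP cs n).elim r (fun j => (j : Int)) := by
  induction n generalizing r with
  | zero => simp [hFun, firstP]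
  | succ k ih =>
    simp only [hFun, ih, firstP, List.range_succ, List.find?_append]
    cases h : (List.range k).find? (fun j => decide (cs.getD j ' ' ∉ cs.drop (j + 1))) with
    | some j => simp
    | none =>
      simp only [List.getD]
      by_cases hP : cs[k]?.getD ' ' ∈ cs.drop (k + 1) <;> simp [hP]

-- Source B's dict holds each char's last index: looked up at j, equality with j means "no later occurrence"
theorem fstB_last_append (cs : List Char) (x : Char) :
    fstB_last (cs ++ [x]) = (fstB_last cs).insert x (cs.length : Int) := by
  simp [fstB_last, PySem.List.enumerate_append, PySem.List.enumerate, List.foldl_append]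

theorem fstB_last_getD (cs : List Char) : ∀ (j : Nat) (hj : j < cs.length),
    ((fstB_last cs).getD (cs[j]) (-1) = (j : Int)) ↔ cs[j] ∉ cs.drop (j + 1) := by
  induction cs using List.reverseRecOn with
  | nil => intro j hj; simp at hj
  | append_singleton xs x ih =>
    intro j hj
    rw [fstB_last_append]
    rcases Nat.lt_or_ge j xs.length with hlt | hge
    · have hgj : (xs ++ [x])[j] = xs[j] := by
        rw [List.getElem_append_left hlt]
      have hd : (xs ++ [x]).drop (j + 1) = xs.drop (j + 1) ++ [x] := by
        rw [List.drop_append_of_le_length (by omega)]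
      rw [hgj, hd, PySem.Dict.getD_insert]
      by_cases hx : xs[j] = x
      · rw [if_pos hx]
        constructor
        · intro h; exfalso; omega
        · intro h; exfalso; exact h (by simp [hx])
      · rw [if_neg hx, ih j hlt]
        simp [hx]
    · have hj' : j = xs.length := by
        simp only [List.length_append, List.length_cons, List.length_nil] at hj; omega
      subst hj'
      have hgj : (xs ++ [x])[xs.length] = x := by simp
      have hd : (xs ++ [x]).drop (xs.length + 1) = [] := by
        apply List.drop_eq_nil_of_le; simp
      rw [hgj, hd, PySem.Dict.getD_insert, if_pos rfl]
      simp

theorem fstB_scan_eq_find (cs : List Char) (last : PySem.Dict Char Int) (l : List Int) :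
    fstB_scan cs last l =
      (l.find? (fun i => decide (last.getD (PySem.List.pyGetD cs i ' ') (-1) = i))).elim
        ((cs.length : Int)) id := by
  induction l with
  | nil => rfl
  | cons i rest ih =>
    simp only [fstB_scan, List.find?_cons]
    by_cases h : last.getD (PySem.List.pyGetD cs i ' ') (-1) = i <;> simp [h, ih]

theorem find?_congr' {α : Type} (l : List α) (p q : α → Bool)
    (h : ∀ a ∈ l, p a = q a) : l.find? p = l.find? q := by
  induction l with
  | nil => rfl
  | cons x xs ih =>
    simp only [List.find?_cons]
    rw [h x (by simp)]
    cases q x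
    · exact ih (fun a ha => h a (by simp [ha]))
    · rfl

theorem alt_eq_firstP (s : String) :
    fst_no_rep_alt s = (firstP s.toList s.toList.length).elim
      ((s.toList.length : Int)) (fun j => (j : Int)) := by
  unfold fst_no_rep_alt
  set cs := s.toList with hcs
  simp only [fstB_scan_eq_find]
  rw [PySem.List.pyRange_one]
  simp only [sub_zero, Int.toNat_natCast, List.find?_map]
  rw [find?_congr' (List.range cs.length)
      _ (fun j => decide (cs.getD j ' ' ∉ cs.drop (j + 1)))]
  · unfold firstP
    cases (List.range cs.length).find? (fun j => decide (cs.getD j ' ' ∉ cs.drop (j + 1))) <;> simp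
  · intro j hj
    rw [List.mem_range] at hj
    have hg : PySem.List.pyGetD cs ((fun k : Nat => (0 : Int) + k) j) ' ' = cs.getD j ' ' := by
      simp [PySem.List.pyGetD_natCast]
    simp only [Function.comp_apply, hg, List.getD_eq_getElem cs ' ' hj]
    rw [show ((0 : Int) + j) = (j : Int) by ring]
    rw [decide_eq_decide.mpr (fstB_last_getD cs j hj)]

-- ===== VERDICT (by name: the statement is the Claim_ definition above) =====
theorem fst_no_rep_spec : Claim_equal_fst_no_rep := by
  intro s _
  unfold Spec_fst_no_rep
  rw [alt_eq_firstP]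
  show fst_no_rep s = _
  unfold fst_no_rep
  rw [fstA_go_eq_hFun s.toList s.toList.length PySem.Set.empty _ le_rfl
      (by intro c; rw [List.drop_length]; simp [PySem.Set.empty])]
  rw [hFun_eq_firstP]
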